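-- pv_equiv track=rewrite | github.com/Ashok-kumar290/synthscreen | app/split_order_detector.py | _greedy_assemble
-- ===== SOURCE A (Python) =====
-- MIN_OVERLAP_BP = 15     # minimum suffix/prefix overlap to merge two fragments
--
-- MAX_ASSEMBLED_BP = 12_000
--
-- def _suffix_prefix_overlap(a: str, b: str) -> int:
--     """Length of longest suffix of a that equals a prefix of b (>= MIN_OVERLAP_BP)."""
--     cap = min(len(a), len(b))
--     for k in range(cap, MIN_OVERLAP_BP - 1, -1):
--         if a[-k:] == b[:k]:
--             return k
--     return 0
--
-- def _greedy_assemble(seqs: list[str]) -> str: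
--     """
--     Greedy overlap-layout-consensus assembly.
--     Repeatedly merges the pair with the largest overlap until no
--     overlaps remain, then concatenates leftover contigs.
--     Returns the longest contig produced.
--     """
--     if not seqs:
--         return ""
--     pool = list(seqs)
--     while len(pool) > 1:
--         best, bi, bj = 0, -1, -1
--         for i in range(len(pool)):
--             for j in range(len(pool)):
--                 if i == j:
--                     continue
--                 ov = _suffix_prefix_overlap(pool[i], pool[j])
--                 if ov > best:
--                     best, bi, bj = ov, i, j
--         if best < MIN_OVERLAP_BP:
--             break
--         merged = pool[bi] + pool[bj][best:]
--         pool = [s for k, s in enumerate(pool) if k not in (bi, bj)]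
--         pool.append(merged)
--         if len(pool[-1]) > MAX_ASSEMBLED_BP:
--             break
--     return max(pool, key=len)
-- ===== SOURCE B (Python) =====
-- MIN_OVERLAP_BP = 15
-- MAX_ASSEMBLED_BP = 12_000
--
-- def _overlap(a: str, b: str) -> int:
--     """Largest k in [MIN_OVERLAP_BP, min(len)] with a ending in b's k-prefix (0 if none)."""
--     best = 0
--     for k in range(MIN_OVERLAP_BP, min(len(a), len(b)) + 1):
--         if a.endswith(b[:k]):
--             best = k
--     return best
--
-- def _greedy_assemble(seqs: list[str]) -> str:
--     if not seqs:
--         return ""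
--     # id-indexed pool with a memoised overlap table: every pairwise overlap is
--     # computed exactly once; after a merge only the O(n) overlaps that involve
--     # the new contig are computed (stale ids are simply never read again).
--     contig = dict(enumerate(seqs))              # id -> sequence
--     order = list(range(len(seqs)))              # current pool, as ids, oldest first
--     cache = {(p, q): _overlap(contig[p], contig[q])
--              for p in order for q in order if p != q}
--     nid = len(seqs)
--     while len(order) > 1:
--         best, bp, bq = max([(cache[(p, q)], p, q)
--                             for p in order for q in order if p != q],
--                            key=lambda t: t[0])
--         if best < MIN_OVERLAP_BP:
--             break
--         merged = contig[bp] + contig[bq][best:]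
--         order = [p for p in order if p != bp and p != bq]
--         for p in order:
--             cache[(p, nid)] = _overlap(contig[p], merged)
--             cache[(nid, p)] = _overlap(merged, contig[p])
--         contig[nid] = merged
--         order.append(nid)
--         nid += 1
--         if len(merged) > MAX_ASSEMBLED_BP:
--             break
--     return max((contig[p] for p in order), key=len)
-- ===== Notes on version B (the rewrite author's own statement) =====
-- stated objective: alternative
-- what changed: B indexes the pool by integer ids and memoises pairwise overlaps in a dict keyed by id pairs so each overlap is computed from the strings only once (after a merge only the entries involving the new contig are added), and it picks each round's best pair as a max over the cached candidate list; the overlap length itself is found by an ascending last-match endswith scan instead of A's descending early-return double-slice scan.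
import Mathlib
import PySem

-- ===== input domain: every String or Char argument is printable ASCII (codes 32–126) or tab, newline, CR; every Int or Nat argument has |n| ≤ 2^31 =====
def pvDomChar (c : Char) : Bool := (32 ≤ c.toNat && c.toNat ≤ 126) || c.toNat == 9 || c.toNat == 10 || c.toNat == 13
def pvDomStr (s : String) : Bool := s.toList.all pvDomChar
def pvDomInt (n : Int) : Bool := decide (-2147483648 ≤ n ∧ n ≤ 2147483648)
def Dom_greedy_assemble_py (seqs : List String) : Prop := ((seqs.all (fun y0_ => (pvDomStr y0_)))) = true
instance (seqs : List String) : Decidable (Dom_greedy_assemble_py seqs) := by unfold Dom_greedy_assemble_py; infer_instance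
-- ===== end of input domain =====

-- B organises the same greedy assembly differently: an id-indexed pool with a memoised overlap
-- table (each pairwise overlap computed from the strings once; after a merge only entries involving
-- the new contig are added), the best pair taken as a max over the cached candidate list, and an
-- ascending last-match endswith overlap scan ("alternative": no speed claim).

-- ===== PORT A =====
-- _suffix_prefix_overlap: for k in range(cap, 14, -1): if a[-k:] == b[:k]: return k; return 0
def pvOvLoopA (a b : List Char) : Nat → Int
  | 0 => 0
  | (k+1) =>
    if k+1 < 15 then 0
    else if PySem.List.slice a (some (-((k : Int)+1))) none == PySem.List.slice b none (some ((k : Int)+1))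
      then (k : Int)+1
      else pvOvLoopA a b k

def pvOverlapA (a b : String) : Int :=
  pvOvLoopA a.toList b.toList (min a.toList.length b.toList.length)

-- the nested best/bi/bj scan of A (running accumulator, update on strict improvement)
def pvUpd (st t : Int × Int × Int) : Int × Int × Int :=
  if t.1 > st.1 then t else st

def pvBestA (pool : List String) : Int × Int × Int :=
  (PySem.List.pyRange 0 (PySem.List.len pool) 1).foldl (fun st i =>
    (PySem.List.pyRange 0 (PySem.List.len pool) 1).foldl (fun st j =>
      if i == j then st
      else pvUpd st (pvOverlapA (PySem.List.pyGetD pool i "") (PySem.List.pyGetD pool j ""), i, j)) st)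
    (0, -1, -1)

-- while len(pool) > 1: … ; fuel = initial length bounds the merge count (each merge shrinks pool by 1)
def pvLoopA : Nat → List String → List String
  | 0, pool => pool
  | (fuel+1), pool =>
    if pool.length ≤ 1 then pool
    else
      let st := pvBestA pool
      if st.1 < 15 then pool
      else
        let merged := PySem.List.pyGetD pool st.2.1 "" ++
          PySem.Str.slice (PySem.List.pyGetD pool st.2.2 "") (some st.1) none
        let pool' := (PySem.List.enumerate pool 0).filterMap
          (fun ks => if ks.1 == st.2.1 || ks.1 == st.2.2 then none else some ks.2) ++ [merged]
        if PySem.Str.len (PySem.List.pyGetD pool' (-1) "") > 12000 then pool'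
        else pvLoopA fuel pool'

def greedy_assemble_py (seqs : List String) : String :=
  if seqs.isEmpty then ""
  else
    match PySem.List.max? (pvLoopA seqs.length seqs) (fun s => PySem.Str.len s) with
    | some m => m
    | none => ""

-- ===== PORT B =====
-- _overlap: best = 0; for k in range(15, min(len)+1): if a.endswith(b[:k]): best = k
def pvOverlapB (a b : String) : Int :=
  (PySem.List.pyRange 15 (((min a.toList.length b.toList.length : Nat) : Int)+1) 1).foldl
    (fun best k => if PySem.Chars.endswith a.toList (PySem.List.slice b.toList none (some k)) then k else best)
    0

-- [(cache[(p, q)], p, q) for p in order for q in order if p != q]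
-- (cache[(p,q)] is a raising lookup in Python; the key is always present — every pair of live
--  ids is in the table — so getD is exact here)
def pvCandsB (order : List Int) (cache : PySem.Dict (Int × Int) Int) : List (Int × Int × Int) :=
  order.flatMap (fun p => order.filterMap (fun q =>
    if p == q then none else some (PySem.Dict.getD cache (p, q) 0, p, q)))

-- cache = {(p, q): _overlap(contig[p], contig[q]) for p in order for q in order if p != q}
def pvInitCache (contig : PySem.Dict Int String) (order : List Int) : PySem.Dict (Int × Int) Int :=
  order.foldl (fun c p => order.foldl (fun c q =>
    if p == q then c
    else c.insert (p, q) (pvOverlapB (PySem.Dict.getD contig p "") (PySem.Dict.getD contig q ""))) c)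
    PySem.Dict.empty

-- the while-loop of B; state = (order, contig, cache, nid); returns (order, contig)
def pvLoopB : Nat → List Int → PySem.Dict Int String → PySem.Dict (Int × Int) Int → Int →
    List Int × PySem.Dict Int String
  | 0, order, contig, _, _ => (order, contig)
  | (fuel+1), order, contig, cache, nid =>
    if order.length ≤ 1 then (order, contig)
    else
      match PySem.List.max? (pvCandsB order cache) (fun t => t.1) with
      | none => (order, contig)   -- unreachable: len(order) > 1 gives a nonempty candidate list
      | some m =>
        if m.1 < 15 then (order, contig)
        else
          let merged := PySem.Dict.getD contig m.2.1 "" ++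
            PySem.Str.slice (PySem.Dict.getD contig m.2.2 "") (some m.1) none
          let order' := order.filter (fun p => !(p == m.2.1) && !(p == m.2.2))
          let cache' := order'.foldl (fun c p =>
            (PySem.Dict.insert c (p, nid) (pvOverlapB (PySem.Dict.getD contig p "") merged)).insert
              (nid, p) (pvOverlapB merged (PySem.Dict.getD contig p ""))) cache
          let contig' := PySem.Dict.insert contig nid merged
          let order'' := order' ++ [nid]
          if PySem.Str.len merged > 12000 then (order'', contig')
          else pvLoopB fuel order'' contig' cache' (nid + 1)

def greedy_assemble_py_alt (seqs : List String) : String :=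
  if seqs.isEmpty then ""
  else
    let contig := (PySem.List.enumerate seqs 0).foldl (fun d pr => d.insert pr.1 pr.2) PySem.Dict.empty
    let order := PySem.List.pyRange 0 (PySem.List.len seqs) 1
    let res := pvLoopB seqs.length order contig (pvInitCache contig order) (PySem.List.len seqs)
    match PySem.List.max? (res.1.map (fun p => PySem.Dict.getD res.2 p "")) (fun s => PySem.Str.len s) with
    | some m => m
    | none => ""

-- ===== PRECONDITION & SPEC =====
def Spec_greedy_assemble_py (seqs : List String) (out : String) : Prop := out = greedy_assemble_py_alt seqs
instance (seqs : List String) (out : String) : Decidable (Spec_greedy_assemble_py seqs out) := by unfold Spec_greedy_assemble_py; infer_instance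

-- ===== CLAIM (what is proved, stated in full; the proofs are below) =====
def Claim_equal_greedy_assemble_py : Prop := ∀ (seqs : List String), Dom_greedy_assemble_py seqs → Spec_greedy_assemble_py seqs (greedy_assemble_py seqs)

-- ===== LEMMAS AND PROOFS =====

-- ---------- the two overlap scans agree ----------
lemma pv_cond_eq (a b : List Char) (k : Nat) (h1 : 0 < k) (hk : k ≤ min a.length b.length) :
    (PySem.List.slice a (some (-(k : Int))) none == PySem.List.slice b none (some (k : Int)))
      = PySem.Chars.endswith a (PySem.List.slice b none (some (k : Int))) := by
  rw [PySem.List.slice_from_neg_natCast a k h1, PySem.List.slice_to_natCast]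
  have hlen : (b.take k).length = k := by simp; omega
  rw [Bool.eq_iff_iff, beq_iff_eq, PySem.Chars.endswith, List.isSuffixOf_iff_suffix,
    List.suffix_iff_eq_drop, hlen]
  constructor <;> (intro h; exact h.symm)

lemma pv_ov_loop_eq (a b : List Char) (n : Nat) (hn : n ≤ min a.length b.length) :
    pvOvLoopA a b n =
      (PySem.List.pyRange 15 ((n : Int)+1) 1).foldl
        (fun best k => if PySem.Chars.endswith a (PySem.List.slice b none (some k)) then k else best) 0 := by
  induction n with
  | zero =>
      rw [pvOvLoopA, PySem.List.pyRange_one_eq_nil (by omega)]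
      rfl
  | succ n ih =>
      by_cases h15 : n + 1 < 15
      · rw [pvOvLoopA, if_pos h15, PySem.List.pyRange_one_eq_nil (by omega)]
        rfl
      · have hc : ((n+1 : Nat) : Int) + 1 = (((n : Nat) : Int) + 1) + 1 := by push_cast; ring
        rw [hc, PySem.List.pyRange_one_succ_right (by omega), List.foldl_append]
        rw [pvOvLoopA, if_neg h15]
        have hcond := pv_cond_eq a b (n+1) (by omega) (by omega)
        push_cast at hcond
        rw [hcond, ih (by omega)]
        by_cases hq : PySem.Chars.endswith a (PySem.List.slice b none (some ((n : Int)+1))) = true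
        · simp [hq]
        · simp [hq]

lemma pv_overlap_eq : pvOverlapA = pvOverlapB := by
  funext a b
  unfold pvOverlapA pvOverlapB
  exact pv_ov_loop_eq a.toList b.toList _ (le_refl _)

lemma pv_fold_last_nonneg (p : Int → Bool) :
    ∀ (l : List Int) (init : Int), 0 ≤ init → (∀ k ∈ l, 0 ≤ k) →
      0 ≤ l.foldl (fun best k => if p k then k else best) init := by
  intro l
  induction l with
  | nil => intro init h _; exact h
  | cons k t ih =>
      intro init h hall
      simp only [List.foldl_cons]
      by_cases hp : p k = true
      · rw [if_pos hp]
        exact ih k (hall k (List.mem_cons_self)) (fun x hx => hall x (List.mem_cons_of_mem _ hx))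
      · rw [if_neg hp]
        exact ih init h (fun x hx => hall x (List.mem_cons_of_mem _ hx))

lemma pv_overlapB_nonneg (a b : String) : 0 ≤ pvOverlapB a b := by
  unfold pvOverlapB
  apply pv_fold_last_nonneg
  · exact le_refl 0
  · intro k hk
    have := (PySem.List.mem_pyRange_one.mp hk).1
    omega

-- ---------- A's nested best scan as a fold over an index-pair candidate list ----------
def pvCandsIdx (pool : List String) : List (Int × Int × Int) :=
  (PySem.List.pyRange 0 (PySem.List.len pool) 1).flatMap (fun i =>
    (PySem.List.pyRange 0 (PySem.List.len pool) 1).filterMap (fun j =>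
      if i == j then none
      else some (pvOverlapB (PySem.List.pyGetD pool i "") (PySem.List.pyGetD pool j ""), i, j)))

lemma pv_foldl_skip (c : Int → Bool) (g : Int → Int × Int × Int) :
    ∀ (l : List Int) (st : Int × Int × Int),
      l.foldl (fun st j => if c j then st else pvUpd st (g j)) st
        = (l.filterMap (fun j => if c j then none else some (g j))).foldl pvUpd st := by
  intro l
  induction l with
  | nil => intro st; rfl
  | cons j t ih =>
      intro st
      by_cases hc : c j = true
      · simp [hc, ih]
      · simp [hc, ih]

lemma pv_bestA_eq (pool : List String) :
    pvBestA pool = (pvCandsIdx pool).foldl pvUpd (0, -1, -1) := by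
  unfold pvBestA pvCandsIdx
  rw [pv_overlap_eq, List.flatMap_def, List.foldl_flatten, List.foldl_map]
  have h : (fun (st : Int × Int × Int) (i : Int) =>
      ((PySem.List.pyRange 0 (PySem.List.len pool) 1).filterMap (fun j =>
        if i == j then none
        else some (pvOverlapB (PySem.List.pyGetD pool i "") (PySem.List.pyGetD pool j ""), i, j))).foldl pvUpd st)
      = (fun (st : Int × Int × Int) (i : Int) =>
      (PySem.List.pyRange 0 (PySem.List.len pool) 1).foldl (fun st j =>
        if i == j then st
        else pvUpd st (pvOverlapB (PySem.List.pyGetD pool i "") (PySem.List.pyGetD pool j ""), i, j)) st) := by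
    funext st i
    exact (pv_foldl_skip (fun j => i == j)
      (fun j => (pvOverlapB (PySem.List.pyGetD pool i "") (PySem.List.pyGetD pool j ""), i, j))
      (PySem.List.pyRange 0 (PySem.List.len pool) 1) st).symm
  rw [h]

-- ---------- Python max(cands, key=first) as a fold ----------
lemma pv_max?_cons_cons (x a : Int × Int × Int) (t : List (Int × Int × Int)) :
    PySem.List.max? (x :: a :: t) (fun s => s.1) = PySem.List.max? (pvUpd x a :: t) (fun s => s.1) := by
  simp only [PySem.List.max?, List.foldl_cons]
  congr 1
  by_cases h : x.1 < a.1 <;> simp [pvUpd, h, gt_iff_lt]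

lemma pv_max?_cons : ∀ (t : List (Int × Int × Int)) (x : Int × Int × Int),
    PySem.List.max? (x :: t) (fun s => s.1) = some (t.foldl pvUpd x) := by
  intro t
  induction t with
  | nil => intro x; rfl
  | cons a t ih =>
      intro x
      rw [pv_max?_cons_cons, ih, List.foldl_cons]

lemma pv_upd_congr : ∀ (l : List (Int × Int × Int)) (st st' : Int × Int × Int), st.1 = st'.1 →
    (l.foldl pvUpd st).1 = (l.foldl pvUpd st').1 ∧
      ((l.foldl pvUpd st).1 ≠ st.1 → l.foldl pvUpd st = l.foldl pvUpd st') := by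
  intro l
  induction l with
  | nil =>
      intro st st' h
      exact ⟨h, fun hne => absurd rfl hne⟩
  | cons t l ih =>
      intro st st' h
      simp only [List.foldl_cons]
      unfold pvUpd
      by_cases hgt : t.1 > st.1
      · rw [if_pos hgt, if_pos (h ▸ hgt)]
        exact ⟨rfl, fun _ => rfl⟩
      · rw [if_neg hgt, if_neg (h ▸ hgt)]
        obtain ⟨e, himp⟩ := ih st st' h
        exact ⟨e, himp⟩

-- ---------- small list helpers ----------
lemma pv_range_map_getD {α : Type} (d : α) (l : List α) :
    (List.range l.length).map (fun i => l.getD i d) = l := by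
  apply List.ext_getElem
  · simp
  · intro i h1 h2
    simp [List.getD_eq_getElem?_getD, List.getElem?_eq_getElem h2]

lemma pv_filter_map_eq_filterMap {α β : Type} (p : α → Bool) (h : α → β) :
    ∀ (l : List α), (l.filter p).map h = l.filterMap (fun a => if p a then some (h a) else none) := by
  intro l
  induction l with
  | nil => rfl
  | cons a t ih => by_cases hp : p a = true <;> simp [hp, ih]

lemma pv_getD_map (order : List Int) (f : Int → String) {i : Nat} (h : i < order.length) :
    (order.map f).getD i "" = f (order.getD i 0) := by
  simp [List.getD_eq_getElem?_getD, h]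

lemma pv_g_inj (order : List Int) (hnd : order.Nodup) {i j : Nat}
    (hi : i < order.length) (hj : j < order.length) :
    order.getD i 0 = order.getD j 0 ↔ i = j := by
  rw [List.getD_eq_getElem?_getD, List.getD_eq_getElem?_getD,
    List.getElem?_eq_getElem hi, List.getElem?_eq_getElem hj]
  simpa using hnd.getElem_inj_iff


lemma pv_flatMap_idx {β : Type} (order : List Int) (F : Int → List β) :
    order.flatMap F = (List.range order.length).flatMap (fun i => F (order.getD i 0)) := by
  conv_lhs => rw [← pv_range_map_getD 0 order]
  rw [List.flatMap_map]

lemma pv_filterMap_idx {β : Type} (order : List Int) (F : Int → Option β) :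
    order.filterMap F = (List.range order.length).filterMap (fun i => F (order.getD i 0)) := by
  conv_lhs => rw [← pv_range_map_getD 0 order]
  rw [List.filterMap_map]
  rfl

-- ---------- the zipped candidate list relating A's (index-based) and B's (id-based) candidates ----------
def pvV (contig : PySem.Dict Int String) (order : List Int) (i j : Nat) : Int :=
  pvOverlapB (PySem.Dict.getD contig (order.getD i 0) "") (PySem.Dict.getD contig (order.getD j 0) "")

def pvZipL (order : List Int) (contig : PySem.Dict Int String) :
    List ((Int × Int × Int) × (Int × Int × Int)) :=
  (List.range order.length).flatMap (fun i =>
    (List.range order.length).filterMap (fun j =>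
      if i = j then none
      else some ((pvV contig order i j, (i : Int), (j : Int)),
                 (pvV contig order i j, order.getD i 0, order.getD j 0))))

lemma pv_mem_zipL {order : List Int} {contig : PySem.Dict Int String}
    {e : (Int × Int × Int) × (Int × Int × Int)} (he : e ∈ pvZipL order contig) :
    ∃ i j : Nat, i < order.length ∧ j < order.length ∧ i ≠ j ∧
      e = ((pvV contig order i j, (i : Int), (j : Int)),
           (pvV contig order i j, order.getD i 0, order.getD j 0)) := by
  unfold pvZipL at he
  rw [List.mem_flatMap] at he
  obtain ⟨i, hi, hmem⟩ := he
  rw [List.mem_filterMap] at hmem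
  obtain ⟨j, hj, heq⟩ := hmem
  rw [List.mem_range] at hi hj
  by_cases hij : i = j
  · rw [if_pos hij] at heq; cases heq
  · rw [if_neg hij] at heq
    cases heq
    exact ⟨i, j, hi, hj, hij, rfl⟩

lemma pv_zipL_fst (order : List Int) (contig : PySem.Dict Int String) :
    pvCandsIdx (order.map (fun p => PySem.Dict.getD contig p "")) =
      (pvZipL order contig).map Prod.fst := by
  unfold pvCandsIdx pvZipL
  rw [List.map_flatMap]
  have hlen : PySem.List.len (order.map (fun p => PySem.Dict.getD contig p "")) =
      ((order.length : Nat) : Int) := by simp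
  rw [hlen, PySem.List.pyRange_zero_nat, List.flatMap_map]
  apply List.flatMap_congr
  intro i hi
  rw [List.mem_range] at hi
  rw [List.map_filterMap, List.filterMap_map]
  apply List.filterMap_congr
  intro j hj
  rw [List.mem_range] at hj
  simp only [Function.comp]
  by_cases hij : i = j
  · simp [hij]
  · have hb : (((i : Nat) : Int) == ((j : Nat) : Int)) = false := by
      simp [hij]
    rw [hb, if_neg hij]
    simp only [Bool.false_eq_true, if_false, Option.map_some]
    rw [PySem.List.pyGetD_natCast, PySem.List.pyGetD_natCast,
      pv_getD_map order _ hi, pv_getD_map order _ hj]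
    rfl

lemma pv_zipL_snd (order : List Int) (contig : PySem.Dict Int String)
    (cache : PySem.Dict (Int × Int) Int) (hnd : order.Nodup)
    (hinv : ∀ p ∈ order, ∀ q ∈ order, p ≠ q →
      PySem.Dict.getD cache (p, q) 0 =
        pvOverlapB (PySem.Dict.getD contig p "") (PySem.Dict.getD contig q "")) :
    pvCandsB order cache = (pvZipL order contig).map Prod.snd := by
  unfold pvCandsB pvZipL
  rw [List.map_flatMap]
  rw [pv_flatMap_idx order (fun p => order.filterMap (fun q =>
    if p == q then none else some (PySem.Dict.getD cache (p, q) 0, p, q)))]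
  apply List.flatMap_congr
  intro i hi
  rw [List.mem_range] at hi
  rw [pv_filterMap_idx order (fun q =>
    if order.getD i 0 == q then none
    else some (PySem.Dict.getD cache (order.getD i 0, q) 0, order.getD i 0, q))]
  rw [List.map_filterMap]
  apply List.filterMap_congr
  intro j hj
  rw [List.mem_range] at hj
  have hmi : order.getD i 0 ∈ order := by
    rw [List.getD_eq_getElem?_getD, List.getElem?_eq_getElem hi]
    exact List.getElem_mem hi
  have hmj : order.getD j 0 ∈ order := by
    rw [List.getD_eq_getElem?_getD, List.getElem?_eq_getElem hj]
    exact List.getElem_mem hj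
  by_cases hij : i = j
  · simp [hij]
  · have hne : order.getD i 0 ≠ order.getD j 0 := by
      intro h; exact hij ((pv_g_inj order hnd hi hj).mp h)
    have hb : (order.getD i 0 == order.getD j 0) = false := beq_eq_false_iff_ne.mpr hne
    rw [hb, if_neg hij]
    simp only [Bool.false_eq_true, if_false, Option.map_some]
    rw [hinv _ hmi _ hmj hne]
    rfl

-- ---------- the paired fold: both running-best scans stay in lockstep ----------
lemma pv_foldl_pair :
    ∀ (L : List ((Int × Int × Int) × (Int × Int × Int))),
      (∀ e ∈ L, e.1.1 = e.2.1) →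
      ∀ (s1 s2 : Int × Int × Int), s1.1 = s2.1 →
        ((L.map Prod.fst).foldl pvUpd s1).1 = ((L.map Prod.snd).foldl pvUpd s2).1 ∧
        ((((L.map Prod.fst).foldl pvUpd s1) = s1 ∧ ((L.map Prod.snd).foldl pvUpd s2) = s2) ∨
          (((L.map Prod.fst).foldl pvUpd s1), ((L.map Prod.snd).foldl pvUpd s2)) ∈ L) := by
  intro L
  induction L with
  | nil =>
      intro _ s1 s2 h
      exact ⟨h, Or.inl ⟨rfl, rfl⟩⟩
  | cons e L ih =>
      intro hv s1 s2 h
      simp only [List.map_cons, List.foldl_cons]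
      have hev : e.1.1 = e.2.1 := hv e List.mem_cons_self
      have hv' : ∀ x ∈ L, x.1.1 = x.2.1 := fun x hx => hv x (List.mem_cons_of_mem _ hx)
      by_cases hgt : e.1.1 > s1.1
      · have h1 : pvUpd s1 e.1 = e.1 := by unfold pvUpd; rw [if_pos hgt]
        have h2 : pvUpd s2 e.2 = e.2 := by
          unfold pvUpd; rw [if_pos (by rw [← hev, ← h]; exact hgt)]
        rw [h1, h2]
        obtain ⟨hfst, hor⟩ := ih hv' e.1 e.2 hev
        refine ⟨hfst, ?_⟩
        rcases hor with ⟨ha, hb⟩ | hmem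
        · rw [ha, hb]
          exact Or.inr (by simp)
        · exact Or.inr (List.mem_cons_of_mem _ hmem)
      · have h1 : pvUpd s1 e.1 = s1 := by unfold pvUpd; rw [if_neg hgt]
        have h2 : pvUpd s2 e.2 = s2 := by
          unfold pvUpd; rw [if_neg (by rw [← hev, ← h]; exact hgt)]
        rw [h1, h2]
        obtain ⟨hfst, hor⟩ := ih hv' s1 s2 h
        exact ⟨hfst, hor.imp id (List.mem_cons_of_mem _)⟩

-- ---------- dict-fold lemmas ----------
lemma pv_upd_cache_getD (nid : Int) (v1 v2 : Int → Int) :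
    ∀ (l : List Int), l.Nodup → (∀ x ∈ l, x ≠ nid) →
    ∀ (c : PySem.Dict (Int × Int) Int) (k : Int × Int),
    (l.foldl (fun c p => (PySem.Dict.insert c (p, nid) (v1 p)).insert (nid, p) (v2 p)) c).getD k 0 =
      if k.2 = nid ∧ k.1 ∈ l then v1 k.1
      else if k.1 = nid ∧ k.2 ∈ l then v2 k.2
      else c.getD k 0 := by
  intro l
  induction l with
  | nil => intro _ _ c k; simp
  | cons x t ih =>
      intro hnd hne c k
      have hxnid : x ≠ nid := hne x List.mem_cons_self
      obtain ⟨k1, k2⟩ := k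
      simp only [List.foldl_cons]
      rw [ih (List.nodup_cons.mp hnd).2 (fun y hy => hne y (List.mem_cons_of_mem _ hy))]
      simp only [List.mem_cons]
      by_cases c1 : k2 = nid ∧ k1 ∈ t
      · rw [if_pos c1, if_pos ⟨c1.1, Or.inr c1.2⟩]
      · rw [if_neg c1]
        by_cases c2 : k1 = nid ∧ k2 ∈ t
        · rw [if_pos c2]
          rw [if_neg (fun hh => by
            rcases hh.2 with h | h
            · exact hxnid (by rw [← h, c2.1])
            · exact (hne k1 (List.mem_cons_of_mem _ h)) c2.1)]
          rw [if_pos ⟨c2.1, Or.inr c2.2⟩]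
        · rw [if_neg c2]
          rw [PySem.Dict.getD_insert, PySem.Dict.getD_insert]
          by_cases d1 : ((k1, k2) : Int × Int) = (nid, x)
          · rw [if_pos d1]
            injection d1 with e1 e2
            subst e1; subst e2
            rw [if_neg (fun hh => hxnid hh.1), if_pos ⟨rfl, Or.inl rfl⟩]
          · rw [if_neg d1]
            by_cases d2 : ((k1, k2) : Int × Int) = (x, nid)
            · rw [if_pos d2]
              injection d2 with e1 e2
              subst e1; subst e2
              rw [if_pos ⟨rfl, Or.inl rfl⟩]
            · rw [if_neg d2]
              rw [if_neg (fun hh => by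
                rcases hh.2 with h | h
                · exact d2 (by rw [h, hh.1])
                · exact c1 ⟨hh.1, h⟩)]
              rw [if_neg (fun hh => by
                rcases hh.2 with h | h
                · exact d1 (by rw [h, hh.1])
                · exact c2 ⟨hh.1, h⟩)]

lemma pv_init_inner (p : Int) (val : Int → Int → Int) :
    ∀ (l : List Int) (c : PySem.Dict (Int × Int) Int) (k : Int × Int),
    (l.foldl (fun c q => if p == q then c else c.insert (p, q) (val p q)) c).getD k 0 =
      if k.1 = p ∧ k.2 ∈ l ∧ k.2 ≠ p then val p k.2 else c.getD k 0 := by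
  intro l
  induction l with
  | nil => intro c k; simp
  | cons q t ih =>
      intro c k
      obtain ⟨k1, k2⟩ := k
      simp only [List.foldl_cons]
      rw [ih]
      simp only [List.mem_cons]
      by_cases c1 : k1 = p ∧ k2 ∈ t ∧ k2 ≠ p
      · rw [if_pos c1, if_pos ⟨c1.1, Or.inr c1.2.1, c1.2.2⟩]
      · rw [if_neg c1]
        by_cases hpq : p = q
        · rw [if_pos (by simp [hpq])]
          rw [if_neg (fun hh => by
            rcases hh.2.1 with h | h
            · exact hh.2.2 (by rw [h, ← hpq])
            · exact c1 ⟨hh.1, h, hh.2.2⟩)]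
        · rw [if_neg (by simp [hpq])]
          rw [PySem.Dict.getD_insert]
          by_cases hk : ((k1, k2) : Int × Int) = (p, q)
          · rw [if_pos hk]
            injection hk with e1 e2
            subst e1; subst e2
            rw [if_pos ⟨rfl, Or.inl rfl, fun h => hpq h.symm⟩]
          · rw [if_neg hk]
            rw [if_neg (fun hh => by
              rcases hh.2.1 with h | h
              · exact hk (by rw [hh.1, h])
              · exact c1 ⟨hh.1, h, hh.2.2⟩)]

lemma pv_init_outer (order : List Int) (val : Int → Int → Int) :
    ∀ (l : List Int) (c : PySem.Dict (Int × Int) Int) (k : Int × Int),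
    (l.foldl (fun c p => order.foldl (fun c q =>
        if p == q then c else c.insert (p, q) (val p q)) c) c).getD k 0 =
      if k.1 ∈ l ∧ k.2 ∈ order ∧ k.2 ≠ k.1 then val k.1 k.2 else c.getD k 0 := by
  intro l
  induction l with
  | nil => intro c k; simp
  | cons p t ih =>
      intro c k
      obtain ⟨k1, k2⟩ := k
      simp only [List.foldl_cons]
      rw [ih, pv_init_inner]
      simp only [List.mem_cons]
      by_cases c1 : k1 ∈ t ∧ k2 ∈ order ∧ k2 ≠ k1
      · rw [if_pos c1, if_pos ⟨Or.inr c1.1, c1.2⟩]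
      · rw [if_neg c1]
        by_cases c2 : k1 = p ∧ k2 ∈ order ∧ k2 ≠ p
        · rw [if_pos c2, if_pos ⟨Or.inl c2.1, c2.2.1, by rw [c2.1]; exact c2.2.2⟩]
          rw [c2.1]
        · rw [if_neg c2]
          rw [if_neg (fun hh => by
            rcases hh.1 with h | h
            · exact c2 ⟨h, hh.2.1, by rw [← h]; exact hh.2.2⟩
            · exact c1 ⟨h, hh.2⟩)]

lemma pv_contig0_getD :
    ∀ (l : List String) (s : Int) (d : PySem.Dict Int String) (k : Int),
    ((PySem.List.enumerate l s).foldl (fun d pr => d.insert pr.1 pr.2) d).getD k "" =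
      if s ≤ k ∧ k < s + (l.length : Int) then l.getD (k - s).toNat "" else d.getD k "" := by
  intro l
  induction l with
  | nil =>
      intro s d k
      rw [PySem.List.enumerate_nil]
      simp only [List.foldl_nil, List.length_nil, Nat.cast_zero, add_zero]
      rw [if_neg (by omega)]
  | cons x xs ih =>
      intro s d k
      rw [PySem.List.enumerate_cons]
      simp only [List.foldl_cons, List.length_cons]
      rw [ih]
      by_cases h1 : s + 1 ≤ k ∧ k < s + 1 + (xs.length : Int)
      · rw [if_pos h1, if_pos (by push_cast; omega)]
        have hn : (k - s).toNat = (k - (s + 1)).toNat + 1 := by omega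
        rw [hn, List.getD_cons_succ]
      · rw [if_neg h1, PySem.Dict.getD_insert]
        by_cases h2 : k = s
        · rw [if_pos h2, if_pos (by push_cast; omega)]
          have hn : (k - s).toNat = 0 := by omega
          rw [hn, List.getD_cons_zero]
        · rw [if_neg h2, if_neg (by push_cast; omega)]

-- ---------- the removal step ----------
lemma pv_removed_eq (order : List Int) (contig : PySem.Dict Int String) (hnd : order.Nodup)
    {i j : Nat} (hi : i < order.length) (hj : j < order.length) :
    (PySem.List.enumerate (order.map (fun p => PySem.Dict.getD contig p "")) 0).filterMap
        (fun ks => if ks.1 == ((i : Nat) : Int) || ks.1 == ((j : Nat) : Int) then none else some ks.2)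
      = (order.filter (fun p => !(p == order.getD i 0) && !(p == order.getD j 0))).map
          (fun p => PySem.Dict.getD contig p "") := by
  have hlen2 : PySem.List.len (order.map (fun p => PySem.Dict.getD contig p "")) =
      ((order.length : Nat) : Int) := by simp
  rw [PySem.List.enumerate_eq_map_pyRange (order.map (fun p => PySem.Dict.getD contig p "")) "",
    hlen2, PySem.List.pyRange_zero_nat, List.map_map, List.filterMap_map]
  rw [pv_filter_map_eq_filterMap, pv_filterMap_idx]
  apply List.filterMap_congr
  intro t ht
  rw [List.mem_range] at ht
  simp only [Function.comp]
  rw [PySem.List.pyGetD_natCast, pv_getD_map order _ ht]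
  by_cases hti : t = i
  · subst hti
    simp
  · by_cases htj : t = j
    · subst htj
      simp
    · have h1 : order.getD t 0 ≠ order.getD i 0 := fun h => hti ((pv_g_inj order hnd ht hi).mp h)
      have h2 : order.getD t 0 ≠ order.getD j 0 := fun h => htj ((pv_g_inj order hnd ht hj).mp h)
      have hc1 : (((t : Nat) : Int) == ((i : Nat) : Int)) = false := by simp [hti]
      have hc2 : (((t : Nat) : Int) == ((j : Nat) : Int)) = false := by simp [htj]
      simp [hc1, hc2]
      exact ⟨by simpa [List.getD_eq_getElem?_getD] using h1,
             by simpa [List.getD_eq_getElem?_getD] using h2⟩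

-- ---------- the main loop correspondence ----------
lemma pv_loop_rel :
    ∀ (fuel : Nat) (order : List Int) (contig : PySem.Dict Int String)
      (cache : PySem.Dict (Int × Int) Int) (nid : Int),
      order.Nodup →
      (∀ p ∈ order, p < nid) →
      (∀ p ∈ order, ∀ q ∈ order, p ≠ q →
        PySem.Dict.getD cache (p, q) 0 =
          pvOverlapB (PySem.Dict.getD contig p "") (PySem.Dict.getD contig q "")) →
      pvLoopA fuel (order.map (fun p => PySem.Dict.getD contig p "")) =
        (pvLoopB fuel order contig cache nid).1.map
          (fun p => PySem.Dict.getD (pvLoopB fuel order contig cache nid).2 p "") := by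
  intro fuel
  induction fuel with
  | zero => intro order contig cache nid _ _ _; rfl
  | succ fuel ih =>
      intro order contig cache nid hnd hbound hinv
      by_cases hsmall : order.length ≤ 1
      · rw [pvLoopA, pvLoopB]
        rw [if_pos (by simpa using hsmall), if_pos hsmall]
      · have hzfst := pv_zipL_fst order contig
        have hzsnd := pv_zipL_snd order contig cache hnd hinv
        have hmem0 : ((pvV contig order 0 1, ((0 : Nat) : Int), ((1 : Nat) : Int)),
            (pvV contig order 0 1, order.getD 0 0, order.getD 1 0)) ∈ pvZipL order contig := by
          unfold pvZipL
          rw [List.mem_flatMap]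
          refine ⟨0, by rw [List.mem_range]; omega, ?_⟩
          rw [List.mem_filterMap]
          exact ⟨1, by rw [List.mem_range]; omega, by simp⟩
        obtain ⟨x, xs, hc⟩ : ∃ x xs, pvCandsB order cache = x :: xs := by
          cases hcb : pvCandsB order cache with
          | nil =>
              exfalso
              rw [hzsnd, List.map_eq_nil_iff] at hcb
              rw [hcb] at hmem0
              exact List.not_mem_nil hmem0
          | cons x xs => exact ⟨x, xs, rfl⟩
        have hmax : PySem.List.max? (pvCandsB order cache) (fun t => t.1)
            = some (xs.foldl pvUpd x) := by rw [hc, pv_max?_cons]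
        have hx0 : 0 ≤ x.1 := by
          have hxmem : x ∈ pvCandsB order cache := by rw [hc]; exact List.mem_cons_self
          rw [hzsnd, List.mem_map] at hxmem
          obtain ⟨e, heL, hex⟩ := hxmem
          obtain ⟨i', j', _, _, _, he⟩ := pv_mem_zipL heL
          subst he
          rw [← hex]
          exact pv_overlapB_nonneg _ _
        have hpair := pv_foldl_pair (pvZipL order contig)
          (by
            intro e he
            obtain ⟨i', j', _, _, _, he'⟩ := pv_mem_zipL he
            subst he'
            rfl)
          (0, -1, -1) (0, -1, -1) rfl
        have hbestA : pvBestA (order.map (fun p => PySem.Dict.getD contig p ""))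
            = ((pvZipL order contig).map Prod.fst).foldl pvUpd (0, -1, -1) := by
          rw [pv_bestA_eq, hzfst]
        have hrB : ((pvZipL order contig).map Prod.snd).foldl pvUpd (0, -1, -1)
            = (x :: xs).foldl pvUpd (0, -1, -1) := by rw [← hzsnd, hc]
        have hr : ((x :: xs).foldl pvUpd (0, -1, -1)).1 = (xs.foldl pvUpd x).1 ∧
            (0 < (xs.foldl pvUpd x).1 →
              (x :: xs).foldl pvUpd (0, -1, -1) = xs.foldl pvUpd x) := by
          simp only [List.foldl_cons]
          by_cases hx : x.1 > (0 : Int)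
          · have hu : pvUpd ((0 : Int), (-1 : Int), (-1 : Int)) x = x := by
              unfold pvUpd; rw [if_pos hx]
            rw [hu]
            exact ⟨rfl, fun _ => rfl⟩
          · have hx00 : x.1 = 0 := le_antisymm (not_lt.mp hx) hx0
            have hu : pvUpd ((0 : Int), (-1 : Int), (-1 : Int)) x = ((0 : Int), (-1 : Int), (-1 : Int)) := by
              unfold pvUpd; rw [if_neg hx]
            rw [hu]
            obtain ⟨e, himp⟩ := pv_upd_congr xs ((0 : Int), (-1 : Int), (-1 : Int)) x (by simp [hx00])
            refine ⟨e, fun hpos => himp ?_⟩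
            rw [e]
            intro h0
            rw [h0] at hpos
            exact lt_irrefl _ hpos
        rw [pvLoopA, pvLoopB]
        rw [if_neg (by simpa using hsmall), if_neg hsmall]
        simp only [hmax]
        by_cases hlt : (xs.foldl pvUpd x).1 < 15
        · have hA15 : (pvBestA (order.map (fun p => PySem.Dict.getD contig p ""))).1 < 15 := by
            rw [hbestA, hpair.1, hrB, hr.1]
            exact hlt
          rw [if_pos hA15, if_pos hlt]
        · have h15 : 15 ≤ (xs.foldl pvUpd x).1 := not_lt.mp hlt
          have hrBmB := hr.2 (by omega)
          have hA1 : (pvBestA (order.map (fun p => PySem.Dict.getD contig p ""))).1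
              = (xs.foldl pvUpd x).1 := by rw [hbestA, hpair.1, hrB, hr.1]
          have hmemL : (((pvZipL order contig).map Prod.fst).foldl pvUpd (0, -1, -1),
              ((pvZipL order contig).map Prod.snd).foldl pvUpd (0, -1, -1)) ∈ pvZipL order contig := by
            rcases hpair.2 with ⟨ha, _⟩ | hm
            · exfalso
              have h0 : (pvBestA (order.map (fun p => PySem.Dict.getD contig p ""))).1 = 0 := by
                rw [hbestA, ha]
              omega
            · exact hm
          obtain ⟨i, j, hi, hj, hij, hee⟩ := pv_mem_zipL hmemL
          have heA : pvBestA (order.map (fun p => PySem.Dict.getD contig p ""))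
              = (pvV contig order i j, ((i : Nat) : Int), ((j : Nat) : Int)) := by
            rw [hbestA]
            exact congrArg Prod.fst hee
          have heB : xs.foldl pvUpd x
              = (pvV contig order i j, order.getD i 0, order.getD j 0) := by
            rw [← hrBmB, ← hrB]
            exact congrArg Prod.snd hee
          have hv15 : 15 ≤ pvV contig order i j := by
            rw [heB] at h15
            exact h15
          simp only [heA, heB]
          rw [if_neg (not_lt.mpr hv15), if_neg (not_lt.mpr hv15)]
          have hg1 : PySem.List.pyGetD (order.map (fun p => PySem.Dict.getD contig p ""))
              ((i : Nat) : Int) "" = PySem.Dict.getD contig (order.getD i 0) "" := by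
            rw [PySem.List.pyGetD_natCast, pv_getD_map order _ hi]
          have hg2 : PySem.List.pyGetD (order.map (fun p => PySem.Dict.getD contig p ""))
              ((j : Nat) : Int) "" = PySem.Dict.getD contig (order.getD j 0) "" := by
            rw [PySem.List.pyGetD_natCast, pv_getD_map order _ hj]
          rw [hg1, hg2, PySem.List.pyGetD_neg_one_append_singleton]
          rw [pv_removed_eq order contig hnd hi hj]
          set m2 := PySem.Dict.getD contig (order.getD i 0) "" ++
            PySem.Str.slice (PySem.Dict.getD contig (order.getD j 0) "")
              (some (pvV contig order i j)) none with hm2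
          set l' := order.filter
            (fun p => !(p == order.getD i 0) && !(p == order.getD j 0)) with hl'
          have hmemo : ∀ p ∈ l', p ∈ order := fun p hp => (List.mem_filter.mp hp).1
          have hfnew : ∀ p ∈ l',
              PySem.Dict.getD (PySem.Dict.insert contig nid m2) p "" =
                PySem.Dict.getD contig p "" := by
            intro p hp
            rw [PySem.Dict.getD_insert,
              if_neg (by have := hbound p (hmemo p hp); omega)]
          have hmap' : l'.map (fun p => PySem.Dict.getD contig p "") ++ [m2]
              = (l' ++ [nid]).map
                  (fun p => PySem.Dict.getD (PySem.Dict.insert contig nid m2) p "") := by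
            rw [List.map_append]
            congr 1
            · exact List.map_congr_left (fun p hp => (hfnew p hp).symm)
            · simp [PySem.Dict.getD_insert]
          by_cases hbig : PySem.Str.len m2 > 12000
          · rw [if_pos hbig, if_pos hbig]
            exact hmap'
          · rw [if_neg hbig, if_neg hbig, hmap']
            refine ih (l' ++ [nid]) (PySem.Dict.insert contig nid m2)
              (l'.foldl (fun c p =>
                (PySem.Dict.insert c (p, nid) (pvOverlapB (PySem.Dict.getD contig p "") m2)).insert
                  (nid, p) (pvOverlapB m2 (PySem.Dict.getD contig p ""))) cache)
              (nid + 1) ?_ ?_ ?_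
            · rw [List.nodup_append]
              refine ⟨hnd.filter _, List.nodup_singleton _, ?_⟩
              intro a ha b hb
              rw [List.mem_singleton] at hb
              subst hb
              have := hbound a (hmemo a ha)
              omega
            · intro p hp
              rcases List.mem_append.mp hp with hp' | hp'
              · have := hbound p (hmemo p hp')
                omega
              · rw [List.mem_singleton] at hp'
                omega
            · intro p hp q hq hpq
              rw [pv_upd_cache_getD nid (fun p => pvOverlapB (PySem.Dict.getD contig p "") m2)
                (fun p => pvOverlapB m2 (PySem.Dict.getD contig p "")) l'
                (hnd.filter _)
                (fun y hy => by have := hbound y (hmemo y hy); omega) cache (p, q)]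
              have hnidl : nid ∉ l' := fun hmem => by have := hbound nid (hmemo nid hmem); omega
              rcases List.mem_append.mp hp with hp' | hp' <;>
                rcases List.mem_append.mp hq with hq' | hq'
              · have hqnid : q ≠ nid := fun h => hnidl (h ▸ hq')
                have hpnid : p ≠ nid := fun h => hnidl (h ▸ hp')
                rw [if_neg (fun h => hqnid h.1), if_neg (fun h => hpnid h.1)]
                rw [hinv p (hmemo p hp') q (hmemo q hq') hpq]
                rw [hfnew p hp', hfnew q hq']
              · rw [List.mem_singleton] at hq'
                rw [if_pos ⟨hq', hp'⟩]
                rw [hfnew p hp', hq', PySem.Dict.getD_insert, if_pos rfl]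
              · rw [List.mem_singleton] at hp'
                rw [if_neg (show ¬(q = nid ∧ p ∈ l') from fun h => hnidl (h.1 ▸ hq')), if_pos ⟨hp', hq'⟩]
                rw [hfnew q hq', hp', PySem.Dict.getD_insert, if_pos rfl]
              · rw [List.mem_singleton] at hp' hq'
                exact absurd (hp'.trans hq'.symm) hpq

-- ===== VERDICT (by name: the statement is the Claim_ definition above) =====
theorem greedy_assemble_py_spec : Claim_equal_greedy_assemble_py := by
  intro seqs _
  unfold Spec_greedy_assemble_py greedy_assemble_py greedy_assemble_py_alt
  by_cases hemp : seqs.isEmpty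
  · rw [if_pos hemp, if_pos hemp]
  · rw [if_neg hemp, if_neg hemp]
    have hlen : PySem.List.len seqs = ((seqs.length : Nat) : Int) := by simp
    have hpool0 : (PySem.List.pyRange 0 (PySem.List.len seqs) 1).map
        (fun p => PySem.Dict.getD
          ((PySem.List.enumerate seqs 0).foldl (fun d pr => d.insert pr.1 pr.2) PySem.Dict.empty)
          p "") = seqs := by
      rw [hlen, PySem.List.pyRange_zero_nat, List.map_map]
      have hpt : ∀ k ∈ List.range seqs.length,
          ((fun p => PySem.Dict.getD
              ((PySem.List.enumerate seqs 0).foldl (fun d pr => d.insert pr.1 pr.2) PySem.Dict.empty)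
              p "") ∘ (fun k : Nat => ((k : Nat) : Int))) k = seqs.getD k "" := by
        intro k hk
        rw [List.mem_range] at hk
        simp only [Function.comp]
        rw [pv_contig0_getD seqs 0 PySem.Dict.empty ((k : Nat) : Int)]
        rw [if_pos (by omega)]
        norm_num
      rw [List.map_congr_left hpt, pv_range_map_getD]
    have hrel := pv_loop_rel seqs.length (PySem.List.pyRange 0 (PySem.List.len seqs) 1)
      ((PySem.List.enumerate seqs 0).foldl (fun d pr => d.insert pr.1 pr.2) PySem.Dict.empty)
      (pvInitCache
        ((PySem.List.enumerate seqs 0).foldl (fun d pr => d.insert pr.1 pr.2) PySem.Dict.empty)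
        (PySem.List.pyRange 0 (PySem.List.len seqs) 1))
      (PySem.List.len seqs)
      (PySem.List.nodup_pyRange_one 0 (PySem.List.len seqs))
      (fun p hp => (PySem.List.mem_pyRange_one.mp hp).2)
      (by
        intro p hp q hq hpq
        unfold pvInitCache
        rw [pv_init_outer]
        rw [if_pos ⟨hp, hq, fun h => hpq h.symm⟩])
    rw [hpool0] at hrel
    rw [hrel]
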